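-- pv_equiv track=rewrite | github.com/Sassi1000/Solutions_to_problems_at_the_LeetCode_level | A_changing_number/A_changing_number/A_changing_number.py | Min_index_of_a_variable_number
-- ===== SOURCE A (Python) =====
-- def A_changing_number(f):
--     if(f<10):
--         return True
--     while(f>9):
--         if(f%2==(f//10)%2):
--             return False
--         f=f//10
--     return True
--
-- def Min_index_of_a_variable_number(a):
--     min=111111111
--     indexMin=-1
--     for i in range(len(a)):
--         if(A_changing_number(a[i])):
--             sum=0
--             temp=a[i]
--             while(temp>0):
--                 sum+=temp%10
--                 temp=temp//10
--             if(min>sum):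
--                 min=sum
--                 indexMin=i
--     return indexMin
--
-- a=[66,123,1,77,12]
-- ===== SOURCE B (Python) =====
-- def Min_index_of_a_variable_number(a):
--     def digit_sum(x):
--         return x % 10 + digit_sum(x // 10) if x > 0 else 0
--
--     def is_changing(x):
--         return x < 10 or (x % 2 != (x // 10) % 2 and is_changing(x // 10))
--
--     sums = [digit_sum(x) if is_changing(x) else None for x in a]
--     vals = [s for s in sums if s is not None]
--     return sums.index(min(vals)) if vals else -1
-- ===== Notes on version B (the rewrite author's own statement) =====
-- stated objective: idiomatic
-- what changed: B is staged: it maps each element to an optional digit sum via recursive digit helpers, takes min() of the qualifying sums, and recovers the answer by a second-pass sums.index(min) value search, instead of A's single loop threading a running (min, index) accumulator with two separate per-element while loops.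
import Mathlib
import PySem

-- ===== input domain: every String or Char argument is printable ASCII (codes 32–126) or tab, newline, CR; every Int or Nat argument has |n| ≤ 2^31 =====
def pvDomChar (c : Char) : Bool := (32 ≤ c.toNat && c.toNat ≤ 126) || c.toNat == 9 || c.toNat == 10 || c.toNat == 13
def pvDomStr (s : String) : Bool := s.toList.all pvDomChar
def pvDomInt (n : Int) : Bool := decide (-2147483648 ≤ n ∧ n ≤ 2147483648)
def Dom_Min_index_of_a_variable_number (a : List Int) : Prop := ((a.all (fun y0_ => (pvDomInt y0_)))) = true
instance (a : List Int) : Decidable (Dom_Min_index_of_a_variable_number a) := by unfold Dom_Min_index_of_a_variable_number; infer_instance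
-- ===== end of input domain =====

-- B replaces A's single accumulator loop (running (min, index) state, two inner while loops per
-- element) by staged passes: a map to optional digit sums (recursive helpers), min() of the
-- qualifying sums, and sums.index(min) to recover the index; objective: idiomatic.

-- ===== PORT A =====
-- while(f>9): …  (Python // and % via PySem; terminates since f//10 shrinks for f>9)
def pvAChgLoop (f : Int) : Bool :=
  if h : f > 9 then
    if PySem.Int.mod f 2 == PySem.Int.mod (PySem.Int.floordiv f 10) 2 then false
    else pvAChgLoop (PySem.Int.floordiv f 10)
  else true
termination_by f.toNat
decreasing_by
  simp only [PySem.Int.floordiv_eq_ediv_of_pos (by omega : (0:Int) < 10)]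
  omega

def A_changing_number (f : Int) : Bool :=
  if f < 10 then true else pvAChgLoop f

-- while(temp>0): sum += temp%10; temp //= 10
def pvASumLoop (temp s : Int) : Int :=
  if h : temp > 0 then pvASumLoop (PySem.Int.floordiv temp 10) (s + PySem.Int.mod temp 10)
  else s
termination_by temp.toNat
decreasing_by
  simp only [PySem.Int.floordiv_eq_ediv_of_pos (by omega : (0:Int) < 10)]
  omega

def Min_index_of_a_variable_number (a : List Int) : Int :=
  ((PySem.List.enumerate a 0).foldl
    (fun (st : Int × Int) (p : Int × Int) =>
      if A_changing_number p.2 then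
        (if st.1 > pvASumLoop p.2 0 then (pvASumLoop p.2 0, p.1) else st)
      else st)
    (111111111, -1)).2

-- ===== PORT B =====
-- digit_sum(x) = x%10 + digit_sum(x//10) if x > 0 else 0
def pvDS (x : Int) : Int :=
  if h : x > 0 then PySem.Int.mod x 10 + pvDS (PySem.Int.floordiv x 10) else 0
termination_by x.toNat
decreasing_by
  simp only [PySem.Int.floordiv_eq_ediv_of_pos (by omega : (0:Int) < 10)]
  omega

-- is_changing(x) = x < 10 or (x%2 != (x//10)%2 and is_changing(x//10))
def pvChg (x : Int) : Bool :=
  if h : x < 10 then true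
  else (PySem.Int.mod x 2 != PySem.Int.mod (PySem.Int.floordiv x 10) 2) && pvChg (PySem.Int.floordiv x 10)
termination_by x.toNat
decreasing_by
  simp only [PySem.Int.floordiv_eq_ediv_of_pos (by omega : (0:Int) < 10)]
  omega

-- sums = [digit_sum(x) if is_changing(x) else None for x in a]
def pvG (x : Int) : Option Int := if pvChg x then some (pvDS x) else none
def pvSums (a : List Int) : List (Option Int) := a.map pvG

def Min_index_of_a_variable_number_alt (a : List Int) : Int :=
  let sums := pvSums a
  let vals : List Int := sums.filterMap id   -- [s for s in sums if s is not None]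
  match PySem.List.min? vals (fun y => y) with   -- min(vals) (none iff vals is empty)
  | none => -1
  | some m => ((PySem.List.index? sums (some m)).getD 0 : Nat)
      -- sums.index(...): never raises since min(vals) occurs in sums; getD 0 is a totality guard only

-- ===== PRECONDITION & SPEC =====
def Spec_Min_index_of_a_variable_number (a : List Int) (out : Int) : Prop := out = Min_index_of_a_variable_number_alt a
instance (a : List Int) (out : Int) : Decidable (Spec_Min_index_of_a_variable_number a out) := by unfold Spec_Min_index_of_a_variable_number; infer_instance

-- ===== CLAIM (what is proved, stated in full; the proofs are below) =====
def Claim_equal_Min_index_of_a_variable_number : Prop := ∀ (a : List Int), Dom_Min_index_of_a_variable_number a → Spec_Min_index_of_a_variable_number a (Min_index_of_a_variable_number a)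

-- ===== LEMMAS AND PROOFS =====

theorem chgLoop_eq_chg (f : Int) : pvAChgLoop f = pvChg f := by
  induction f using pvAChgLoop.induct with
  | case1 f h hpar =>
      rw [pvAChgLoop, dif_pos h, if_pos hpar, pvChg, dif_neg (by omega : ¬ f < 10)]
      have hb : (PySem.Int.mod f 2 != PySem.Int.mod (PySem.Int.floordiv f 10) 2) = false :=
        bne_eq_false_iff_eq.2 (beq_iff_eq.1 hpar)
      rw [hb, Bool.false_and]
  | case2 f h hpar ih =>
      rw [pvAChgLoop, dif_pos h, if_neg hpar, pvChg, dif_neg (by omega : ¬ f < 10), ih]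
      have hb : (PySem.Int.mod f 2 != PySem.Int.mod (PySem.Int.floordiv f 10) 2) = true :=
        bne_iff_ne.2 (fun he => hpar (beq_iff_eq.2 he))
      rw [hb, Bool.true_and]
  | case3 f h =>
      rw [pvAChgLoop, dif_neg h, pvChg, dif_pos (by omega : f < 10)]

theorem A_chg_eq (f : Int) : A_changing_number f = pvChg f := by
  rw [A_changing_number]
  by_cases h : f < 10
  · rw [if_pos h, pvChg, dif_pos h]
  · rw [if_neg h, chgLoop_eq_chg]

theorem sumLoop_eq (t : Int) : ∀ s, pvASumLoop t s = s + pvDS t := by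
  induction t using pvDS.induct with
  | case1 t h ih =>
      intro s
      rw [pvASumLoop, dif_pos h, pvDS, dif_pos h, ih]
      ring
  | case2 t h =>
      intro s
      rw [pvASumLoop, dif_neg h, pvDS, dif_neg h]
      simp

theorem pvDS_le (x : Int) : pvDS x ≤ max x 0 := by
  induction x using pvDS.induct with
  | case1 x h ih =>
      rw [pvDS, dif_pos h]
      have h10 : (0:Int) < 10 := by omega
      have h1 := PySem.Int.mod_nonneg x h10
      have h2 := PySem.Int.mod_lt x h10
      have h3 := PySem.Int.floordiv_mul_add_mod x 10
      have h4 : PySem.Int.floordiv x 10 = x / 10 := PySem.Int.floordiv_eq_ediv_of_pos h10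
      rw [h4] at ih h3 ⊢
      omega
  | case2 x h => rw [pvDS, dif_neg h]; simp

theorem pvDS_bound (x : Int) (hx : x ≤ 2147483648) : pvDS x < 111111111 := by
  by_cases h : x > 0
  · rw [pvDS, dif_pos h]
    have h10 : (0:Int) < 10 := by omega
    have hm1 := PySem.Int.mod_lt x h10
    have hm1' := PySem.Int.mod_nonneg x h10
    by_cases h2 : PySem.Int.floordiv x 10 > 0
    · rw [pvDS, dif_pos h2]
      have hm2 := PySem.Int.mod_lt (PySem.Int.floordiv x 10) h10
      have hm2' := PySem.Int.mod_nonneg (PySem.Int.floordiv x 10) h10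
      have hle := pvDS_le (PySem.Int.floordiv (PySem.Int.floordiv x 10) 10)
      simp only [PySem.Int.floordiv_eq_ediv_of_pos h10] at *
      omega
    · rw [pvDS, dif_neg h2]
      omega
  · rw [pvDS, dif_neg h]; omega

-- characterisation of A's fold: it computes the running minimum of the qualifying digit sums
-- together with the first index attaining it
theorem foldA_char (l : List Int) : ∀ (k m i : Int),
    (PySem.List.enumerate l k).foldl
      (fun (st : Int × Int) (p : Int × Int) =>
        if pvChg p.2 then
          (if st.1 > pvDS p.2 then (pvDS p.2, p.1) else st)
        else st) (m, i)
    = (if (l.filterMap pvG).foldl min m = m then (m, i)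
       else ((l.filterMap pvG).foldl min m,
             k + ((PySem.List.index? (l.map pvG) (some ((l.filterMap pvG).foldl min m))).getD 0 : Nat))) := by
  induction l with
  | nil => intro k m i; simp
  | cons x xs ih =>
      intro k m i
      rw [PySem.List.enumerate_cons, List.foldl_cons]
      by_cases hc : pvChg x
      · simp only [hc, if_true]
        have hg : pvG x = some (pvDS x) := by rw [pvG, if_pos hc]
        by_cases hlt : m > pvDS x
        · rw [if_pos hlt, ih]
          have hvals : (x :: xs).filterMap pvG = pvDS x :: xs.filterMap pvG := by
            simp [List.filterMap_cons, hg]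
          rw [hvals]
          simp only [List.foldl_cons]
          have hmin : min m (pvDS x) = pvDS x := by omega
          rw [hmin]
          set m' := (xs.filterMap pvG).foldl min (pvDS x) with hm'
          have hle : m' ≤ pvDS x := (PySem.List.foldl_min_le (xs.filterMap pvG) (pvDS x)).1
          have hm'ne : m' ≠ m := by omega
          rw [if_neg hm'ne]
          by_cases heq : m' = pvDS x
          · rw [if_pos heq]
            have h0 : PySem.List.index? (pvG x :: List.map pvG xs) (some m') = some 0 := by
              rw [hg, heq]
              exact PySem.List.index?_cons_self _ _
            rw [List.map_cons, h0]
            simp [heq]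
          · rw [if_neg heq]
            -- m' ∈ the tail sums, so index? of the tail is some
            have hmem : m' ∈ xs.filterMap pvG := by
              rcases PySem.List.foldl_min_mem (xs.filterMap pvG) (pvDS x) with h | h
              · exact absurd h heq
              · exact h
            have hsome : (PySem.List.index? (xs.map pvG) (some m')).isSome := by
              rw [PySem.List.index?_isSome_iff]
              rcases List.mem_filterMap.1 hmem with ⟨y, hy, hgy⟩
              exact List.mem_map.2 ⟨y, hy, hgy⟩
            obtain ⟨n, hn⟩ := Option.isSome_iff_exists.1 hsome
            have hne : pvG x ≠ some m' := by
              rw [hg]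
              simp only [ne_eq, Option.some.injEq]
              exact fun hh => heq hh.symm
            rw [List.map_cons, PySem.List.index?_cons_of_ne (List.map pvG xs) hne, hn]
            simp only [Option.map_some, Option.getD_some, Prod.mk.injEq, true_and]
            push_cast
            ring
        · rw [if_neg hlt, ih]
          have hvals : (x :: xs).filterMap pvG = pvDS x :: xs.filterMap pvG := by
            simp [List.filterMap_cons, hg]
          rw [hvals]
          simp only [List.foldl_cons]
          have hmin : min m (pvDS x) = m := by omega
          rw [hmin]
          set m' := (xs.filterMap pvG).foldl min m with hm'
          by_cases heqm : m' = m
          · rw [if_pos heqm, if_pos heqm]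
          · rw [if_neg heqm, if_neg heqm]
            have hlem : m' ≤ m := (PySem.List.foldl_min_le (xs.filterMap pvG) m).1
            have hne : pvG x ≠ some m' := by
              rw [hg]
              simp only [ne_eq, Option.some.injEq]
              omega
            have hmem : m' ∈ xs.filterMap pvG := by
              rcases PySem.List.foldl_min_mem (xs.filterMap pvG) m with h | h
              · exact absurd h heqm
              · exact h
            have hsome : (PySem.List.index? (xs.map pvG) (some m')).isSome := by
              rw [PySem.List.index?_isSome_iff]
              rcases List.mem_filterMap.1 hmem with ⟨y, hy, hgy⟩
              exact List.mem_map.2 ⟨y, hy, hgy⟩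
            obtain ⟨n, hn⟩ := Option.isSome_iff_exists.1 hsome
            rw [List.map_cons, PySem.List.index?_cons_of_ne (List.map pvG xs) hne, hn]
            simp only [Option.map_some, Option.getD_some, Prod.mk.injEq, true_and]
            push_cast
            ring
      · simp only [hc, Bool.false_eq_true, if_false]
        have hg : pvG x = none := by rw [pvG, if_neg hc]
        rw [ih]
        have hvals : (x :: xs).filterMap pvG = xs.filterMap pvG := by
          simp [List.filterMap_cons, hg]
        rw [hvals]
        set m' := (xs.filterMap pvG).foldl min m with hm'
        by_cases heqm : m' = m
        · rw [if_pos heqm, if_pos heqm]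
        · rw [if_neg heqm, if_neg heqm]
          have hmem : m' ∈ xs.filterMap pvG := by
            rcases PySem.List.foldl_min_mem (xs.filterMap pvG) m with h | h
            · exact absurd h heqm
            · exact h
          have hsome : (PySem.List.index? (xs.map pvG) (some m')).isSome := by
            rw [PySem.List.index?_isSome_iff]
            rcases List.mem_filterMap.1 hmem with ⟨y, hy, hgy⟩
            exact List.mem_map.2 ⟨y, hy, hgy⟩
          obtain ⟨n, hn⟩ := Option.isSome_iff_exists.1 hsome
          have hne : pvG x ≠ some m' := by rw [hg]; simp
          rw [List.map_cons, PySem.List.index?_cons_of_ne (List.map pvG xs) hne, hn]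
          simp only [Option.map_some, Option.getD_some, Prod.mk.injEq, true_and]
          push_cast
          ring

-- ===== VERDICT (by name: the statement is the Claim_ definition above) =====
theorem Min_index_of_a_variable_number_spec : Claim_equal_Min_index_of_a_variable_number := by
  intro a hdom
  unfold Spec_Min_index_of_a_variable_number
  rw [Min_index_of_a_variable_number, Min_index_of_a_variable_number_alt]
  simp only [A_chg_eq, sumLoop_eq, zero_add]
  rw [foldA_char]
  have hsums : pvSums a = a.map pvG := rfl
  have hvals : (pvSums a).filterMap id = a.filterMap pvG := by
    rw [hsums, List.filterMap_map]
    rfl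
  rcases hv : a.filterMap pvG with _ | ⟨v, vs⟩
  · -- no qualifying element: both return -1
    have hvals2 : (pvSums a).filterMap id = ([] : List Int) := by rw [hvals, hv]
    rw [hvals2]
    simp only [List.foldl_nil, if_pos]
    rfl
  · -- v is the digit sum of some element of a, hence < 111111111 under Dom
    have hvmem : v ∈ a.filterMap pvG := by rw [hv]; exact List.mem_cons_self
    obtain ⟨x, hxa, hgx⟩ := List.mem_filterMap.1 hvmem
    have hvds : v = pvDS x := by
      rw [pvG] at hgx
      by_cases hc : pvChg x
      · rw [if_pos hc] at hgx
        exact (Option.some_inj.1 hgx).symm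
      · rw [if_neg hc] at hgx
        cases hgx
    have hxb : x ≤ 2147483648 := by
      unfold Dom_Min_index_of_a_variable_number at hdom
      rw [List.all_eq_true] at hdom
      have := hdom x hxa
      simp [pvDomInt] at this
      exact this.2
    have hvlt : v < 111111111 := hvds ▸ pvDS_bound x hxb
    have hvals2 : (pvSums a).filterMap id = v :: vs := by rw [hvals, hv]
    rw [hvals2, PySem.List.min?_id_cons]
    simp only [List.foldl_cons]
    have hmin : min (111111111 : Int) v = v := by omega
    rw [hmin]
    set m' := vs.foldl min v with hm'
    have hle : m' ≤ v := (PySem.List.foldl_min_le vs v).1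
    rw [if_neg (by omega : ¬ m' = (111111111:Int))]
    simp [pvSums]
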